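-- pv_equiv track=rewrite | github.com/massmann1/flyradar | app/bot/handlers/subscriptions.py | _normalize_place_suggestions
-- ===== SOURCE A (Python) =====
-- def _normalize_place_suggestions(options: list[dict]) -> list[dict[str, str]]:
--     suggestions: list[dict[str, str]] = []
--     seen_codes: set[str] = set()
--     for option in options:
--         code = str(option.get("code") or "").strip().upper()
--         if len(code) != 3 or code in seen_codes:
--             continue
--         suggestions.append({"code": code, "label": _format_place_option(option, code)})
--         seen_codes.add(code)
--         if len(suggestions) >= 5:
--             break
--     return suggestions
--
-- def _format_place_option(option: dict, code: str | None = None) -> str: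
--     normalized_code = (code or option.get("code") or "").strip().upper()
--     city_name = str(option.get("city_name") or option.get("cityName") or "").strip()
--     place_name = str(option.get("name") or "").strip()
--     country_name = str(option.get("country_name") or option.get("countryName") or "").strip()
--     place_type = str(option.get("type") or "").strip().lower()
--
--     if place_type == "airport" and city_name and place_name and city_name.casefold() != place_name.casefold():
--         main_label = f"{city_name} — {place_name}"
--     else:
--         main_label = place_name or city_name or normalized_code
--
--     if country_name and country_name.casefold() not in main_label.casefold():
--         main_label = f"{main_label}, {country_name}"
--
--     return f"{main_label} ({normalized_code})" if normalized_code else main_label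
-- ===== SOURCE B (Python) =====
-- def _format_place_option(option, code=None):
--     normalized_code = (code or option.get("code") or "").strip().upper()
--     city_name = str(option.get("city_name") or option.get("cityName") or "").strip()
--     place_name = str(option.get("name") or "").strip()
--     country_name = str(option.get("country_name") or option.get("countryName") or "").strip()
--     place_type = str(option.get("type") or "").strip().lower()
--
--     if place_type == "airport" and city_name and place_name and city_name.casefold() != place_name.casefold():
--         main_label = f"{city_name} — {place_name}"
--     else:
--         main_label = place_name or city_name or normalized_code
--
--     if country_name and country_name.casefold() not in main_label.casefold():
--         main_label = f"{main_label}, {country_name}"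
--
--     return f"{main_label} ({normalized_code})" if normalized_code else main_label
--
--
-- def _normalize_place_suggestions(options):
--     # Phase 1: order-preserving dict of each valid 3-char code -> first option producing it.
--     by_code = {}
--     for option in options:
--         code = str(option.get("code") or "").strip().upper()
--         if len(code) == 3 and code not in by_code:
--             by_code[code] = option
--     # Phase 2: cap at five and format.
--     return [{"code": code, "label": _format_place_option(option, code)}
--             for code, option in list(by_code.items())[:5]]
-- ===== Notes on version B (the rewrite author's own statement) =====
-- stated objective: simpler
-- what changed: A's single loop with a seen-set, continue and early break is split into two phases: an order-preserving dict mapping each valid 3-char code to its first option (dedup by dict key), then a [:5] slice formatted into suggestions.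
import Mathlib
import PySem

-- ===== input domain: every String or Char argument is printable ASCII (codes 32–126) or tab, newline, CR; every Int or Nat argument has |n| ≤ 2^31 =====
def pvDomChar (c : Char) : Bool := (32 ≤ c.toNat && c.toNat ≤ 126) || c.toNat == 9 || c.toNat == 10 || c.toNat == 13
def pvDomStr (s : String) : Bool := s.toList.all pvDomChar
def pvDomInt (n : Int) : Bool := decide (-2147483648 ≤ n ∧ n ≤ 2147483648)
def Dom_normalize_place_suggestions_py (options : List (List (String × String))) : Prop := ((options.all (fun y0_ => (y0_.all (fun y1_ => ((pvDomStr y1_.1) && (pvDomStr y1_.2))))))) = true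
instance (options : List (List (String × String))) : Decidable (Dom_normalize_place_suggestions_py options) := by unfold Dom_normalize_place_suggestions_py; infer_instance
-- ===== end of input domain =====

-- B replaces A's single loop with a seen-set and early break by two phases: an
-- order-preserving dict keyed by normalized code (dedup), then slice-to-5 and format.
-- Objective: simpler decomposition; same exact result.

-- ===== PORT A =====
-- shared helpers: both Pythons contain the same `x or y` chains, `option.get`,
-- code normalization line, and the same-module helper _format_place_option.

-- `a or b` where a : Option String ('' and None are falsy)
def pvOrStr (a : Option String) (b : String) : String :=
  match a with
  | some s => if s = "" then b else s
  | none => b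

-- option.get(k): first match in the association list
def pvGet (option : List (String × String)) (k : String) : Option String :=
  PySem.Dict.get? ⟨option⟩ k

-- str(option.get("code") or "").strip().upper()
def pvNormCode (option : List (String × String)) : String :=
  PySem.Str.upper (PySem.Str.strip (pvOrStr (pvGet option "code") ""))

-- _format_place_option; .casefold() ported as PySem.Str.lower (exact on the ASCII domain)
def pvFormatPlaceOption (option : List (String × String)) (code : Option String) : String :=
  let normalized_code := PySem.Str.upper (PySem.Str.strip (pvOrStr code (pvOrStr (pvGet option "code") "")))
  let city_name := PySem.Str.strip (pvOrStr (pvGet option "city_name") (pvOrStr (pvGet option "cityName") ""))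
  let place_name := PySem.Str.strip (pvOrStr (pvGet option "name") "")
  let country_name := PySem.Str.strip (pvOrStr (pvGet option "country_name") (pvOrStr (pvGet option "countryName") ""))
  let place_type := PySem.Str.lower (PySem.Str.strip (pvOrStr (pvGet option "type") ""))
  let main_label :=
    if place_type = "airport" ∧ city_name ≠ "" ∧ place_name ≠ "" ∧
        PySem.Str.lower city_name ≠ PySem.Str.lower place_name then
      city_name ++ " — " ++ place_name
    else if place_name ≠ "" then place_name
    else if city_name ≠ "" then city_name
    else normalized_code
  let main_label2 :=
    if country_name ≠ "" ∧ PySem.Str.isIn (PySem.Str.lower country_name) (PySem.Str.lower main_label) = false then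
      main_label ++ ", " ++ country_name
    else main_label
  if normalized_code ≠ "" then main_label2 ++ " (" ++ normalized_code ++ ")" else main_label2

-- A's loop (with `continue` and `break`) as structural recursion over the options
def pvNormAGo (opts : List (List (String × String)))
    (suggestions : List (List (String × String))) (seen_codes : PySem.Set String) :
    List (List (String × String)) :=
  match opts with
  | [] => suggestions
  | option :: rest =>
    let code := pvNormCode option
    if PySem.Str.len code ≠ 3 ∨ PySem.Set.contains seen_codes code = true then
      pvNormAGo rest suggestions seen_codes
    else
      let suggestions' := suggestions ++ [[("code", code), ("label", pvFormatPlaceOption option (some code))]]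
      let seen' := PySem.Set.add seen_codes code
      if 5 ≤ suggestions'.length then suggestions' else pvNormAGo rest suggestions' seen'

def normalize_place_suggestions_py (options : List (List (String × String))) : List (List (String × String)) :=
  pvNormAGo options [] PySem.Set.empty

-- ===== PORT B =====
-- phase 1: by_code = {} ; keep the first option for each valid 3-char code
def pvBStep (d : PySem.Dict String (List (String × String))) (option : List (String × String)) :
    PySem.Dict String (List (String × String)) :=
  let code := pvNormCode option
  if PySem.Str.len code = 3 ∧ d.contains code = false then d.insert code option else d

def pvNormBDict (options : List (List (String × String))) : PySem.Dict String (List (String × String)) :=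
  options.foldl pvBStep PySem.Dict.empty

-- phase 2: first five items, formatted
def normalize_place_suggestions_py_alt (options : List (List (String × String))) : List (List (String × String)) :=
  ((pvNormBDict options).items.take 5).map
    (fun p => [("code", p.1), ("label", pvFormatPlaceOption p.2 (some p.1))])

-- ===== PRECONDITION & SPEC =====
def Spec_normalize_place_suggestions_py (options : List (List (String × String))) (out : List (List (String × String))) : Prop := out = normalize_place_suggestions_py_alt options
instance (options : List (List (String × String))) (out : List (List (String × String))) : Decidable (Spec_normalize_place_suggestions_py options out) := by unfold Spec_normalize_place_suggestions_py; infer_instance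

-- ===== CLAIM (what is proved, stated in full; the proofs are below) =====
def Claim_equal_normalize_place_suggestions_py : Prop := ∀ (options : List (List (String × String))), Dom_normalize_place_suggestions_py options → Spec_normalize_place_suggestions_py options (normalize_place_suggestions_py options)

-- ===== LEMMAS AND PROOFS =====

def pvRender (p : String × List (String × String)) : List (String × String) :=
  [("code", p.1), ("label", pvFormatPlaceOption p.2 (some p.1))]

-- B's fold only appends items
theorem pvNormB_items_mono (opts : List (List (String × String)))
    (d : PySem.Dict String (List (String × String))) :
    ∃ e, (opts.foldl pvBStep d).items = d.items ++ e := by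
  induction opts generalizing d with
  | nil => exact ⟨[], by simp⟩
  | cons o rest ih =>
    simp only [List.foldl_cons]
    by_cases h : PySem.Str.len (pvNormCode o) = 3 ∧ d.contains (pvNormCode o) = false
    · obtain ⟨e, he⟩ := ih (d.insert (pvNormCode o) o)
      refine ⟨[(pvNormCode o, o)] ++ e, ?_⟩
      rw [show pvBStep d o = d.insert (pvNormCode o) o from by simp only [pvBStep, if_pos h],
        he, PySem.Dict.items_insert_of_not_contains _ _ h.2, List.append_assoc]
    · obtain ⟨e, he⟩ := ih d
      exact ⟨e, by rw [show pvBStep d o = d from by simp only [pvBStep, if_neg h]]; exact he⟩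

-- main invariant: A's loop state is rendered from B's partial dict
theorem pvMain (opts : List (List (String × String)))
    (d : PySem.Dict String (List (String × String)))
    (hlen : d.items.length < 5) :
    pvNormAGo opts (d.items.map pvRender) d.keys =
      ((opts.foldl pvBStep d).items.take 5).map pvRender := by
  induction opts generalizing d with
  | nil =>
    simp only [pvNormAGo, List.foldl_nil]
    rw [List.take_of_length_le (by omega)]
  | cons option rest ih =>
    simp only [pvNormAGo, List.foldl_cons]
    have hcont : PySem.Set.contains d.keys (pvNormCode option) = d.contains (pvNormCode option) := by
      simp [PySem.Set.contains, PySem.Dict.contains_eq_decide_mem_keys]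
    by_cases h : PySem.Str.len (pvNormCode option) ≠ 3 ∨ PySem.Set.contains d.keys (pvNormCode option) = true
    · rw [if_pos h]
      have hstep : pvBStep d option = d := by
        rw [pvBStep, if_neg]
        rcases h with h | h
        · exact fun hc => h hc.1
        · rw [hcont] at h; exact fun hc => by rw [h] at hc; exact absurd hc.2 (by simp)
      rw [hstep]
      exact ih d hlen
    · rw [if_neg h]
      rw [not_or] at h
      obtain ⟨h3', hmem⟩ := h
      have h3 := not_not.mp h3'
      have hmem' : d.contains (pvNormCode option) = false := by
        rw [← hcont]; exact Bool.not_eq_true _ ▸ hmem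
      have hstep : pvBStep d option = d.insert (pvNormCode option) option := by
        rw [pvBStep, if_pos ⟨h3, hmem'⟩]
      rw [hstep]
      have hitems : (d.insert (pvNormCode option) option).items = d.items ++ [(pvNormCode option, option)] :=
        PySem.Dict.items_insert_of_not_contains _ _ hmem'
      have hkeys : (d.insert (pvNormCode option) option).keys = d.keys ++ [pvNormCode option] :=
        PySem.Dict.keys_insert_of_not_contains _ _ hmem'
      have hnk : pvNormCode option ∉ d.keys := by
        rw [PySem.Dict.contains_eq_decide_mem_keys] at hmem'; simpa using hmem'
      have hadd : PySem.Set.add d.keys (pvNormCode option) = d.keys ++ [pvNormCode option] := by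
        simp [PySem.Set.add, PySem.Set.contains, hnk]
      have hsugg : d.items.map pvRender ++ [[("code", pvNormCode option), ("label", pvFormatPlaceOption option (some (pvNormCode option)))]]
          = (d.insert (pvNormCode option) option).items.map pvRender := by
        rw [hitems, List.map_append]; rfl
      rw [hsugg, hadd, ← hkeys]
      by_cases h5 : 5 ≤ ((d.insert (pvNormCode option) option).items.map pvRender).length
      · rw [if_pos h5]
        obtain ⟨e, he⟩ := pvNormB_items_mono rest (d.insert (pvNormCode option) option)
        rw [he]
        have hl5 : (d.insert (pvNormCode option) option).items.length = 5 := by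
          rw [List.length_map] at h5
          rw [hitems] at h5 ⊢
          simp at h5 ⊢
          omega
        rw [← hl5, List.take_left]
      · rw [if_neg h5]
        apply ih
        rw [List.length_map] at h5
        omega

-- ===== VERDICT (by name: the statement is the Claim_ definition above) =====
theorem normalize_place_suggestions_py_spec : Claim_equal_normalize_place_suggestions_py := by
  intro options _
  unfold Spec_normalize_place_suggestions_py normalize_place_suggestions_py normalize_place_suggestions_py_alt pvNormBDict
  have h := pvMain options PySem.Dict.empty (by simp [PySem.Dict.empty])
  simpa [PySem.Dict.empty, PySem.Set.empty, pvRender] using h
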